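-- pv_equiv track=rewrite | github.com/scramjetorg/transform-hub | packages/python-runner/tecemux.py | _get_unused_extra_channel_id
-- ===== SOURCE A (Python) =====
-- def _get_unused_extra_channel_id(used_channel_ids, start_from=10):
--     """Returns lowest, unused channel number
--
--     Args:
--         used_channel_ids (list): List of *USED* channel ids
--         start_from (int, optional): Minimal channel id. Defaults to 10.
--
--     Returns:
--         int: lowest, unused channel number
--     """
--     used_channel_ids = sorted(set(used_channel_ids))
--     if len(used_channel_ids) == 0 or used_channel_ids[0] != start_from:
--         return start_from
--     for i, v in enumerate(used_channel_ids, start_from):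
--         if i != v:
--             return i
--     return i+1
-- ===== SOURCE B (Python) =====
-- def _get_unused_extra_channel_id(used_channel_ids, start_from=10):
--     used = set(used_channel_ids)
--     n = start_from
--     while n in used:
--         n += 1
--     return n
-- ===== Notes on version B (the rewrite author's own statement) =====
-- stated objective: simpler
-- what changed: B drops the sort-then-linear-scan over sorted(set(ids)) and instead probes a hash set upward from start_from until a free id is found, which also returns a truly unused id when ids below start_from are present.
-- intended difference: On inputs where start_from is itself a used id but some used id lies below start_from, A's guard fires (sorted[0] != start_from) and A returns start_from even though it is used; B returns the first id >= start_from that is actually unused, which is what 'lowest unused channel number' intends. — e.g. on _get_unused_extra_channel_id([5, 10], 10): A returns 10, B returns 11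
import Mathlib
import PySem

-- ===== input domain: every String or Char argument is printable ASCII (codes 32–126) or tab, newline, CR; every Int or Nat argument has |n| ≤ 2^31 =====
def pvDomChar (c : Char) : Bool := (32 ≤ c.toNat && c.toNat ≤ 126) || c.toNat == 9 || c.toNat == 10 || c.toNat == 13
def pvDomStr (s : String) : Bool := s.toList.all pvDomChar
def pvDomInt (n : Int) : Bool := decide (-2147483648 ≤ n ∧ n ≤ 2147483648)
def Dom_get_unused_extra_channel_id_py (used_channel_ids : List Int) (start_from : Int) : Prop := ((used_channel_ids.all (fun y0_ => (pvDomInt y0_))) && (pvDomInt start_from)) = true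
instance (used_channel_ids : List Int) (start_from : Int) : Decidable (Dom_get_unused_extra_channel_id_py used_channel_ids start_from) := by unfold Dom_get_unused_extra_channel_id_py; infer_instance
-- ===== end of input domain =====

-- B replaces A's sort-then-scan with an upward hash-set probe from start_from (simpler); where a used
-- id below start_from coexists with a used start_from, A returns the used start_from while B returns a
-- truly unused id — stated as the intended difference D_ below.


-- ===== PORT A =====
-- the 'for i, v in enumerate(used_channel_ids, start_from)' loop; the accumulator is the current
-- enumerate index i.  Reaching [] means the loop finished: the accumulator then holds (last i)+1,
-- which is exactly Python's final 'return i+1' (the [] case is only reached with a nonempty start).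
def scanA_get_unused : List Int → Int → Int
  | [], i => i
  | v :: rest, i => if i ≠ v then i else scanA_get_unused rest (i + 1)

def get_unused_extra_channel_id_py (used_channel_ids : List Int) (start_from : Int) : Int :=
  let u := PySem.List.sorted (PySem.Set.ofList used_channel_ids) (fun x => x) false
  if u.length = 0 ∨ PySem.List.pyGet? u 0 ≠ some start_from then start_from
  else scanA_get_unused u start_from

-- ===== PORT B =====
-- 'n = start_from; while n in used: n += 1; return n'.  The while loop is ported with fuel
-- |used_channel_ids| + 1, a termination bound only: the distinct used set has at most
-- |used_channel_ids| elements, so the loop exits within that many probes (proved below).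
def probeB_get_unused (used : List Int) : Nat → Int → Int
  | 0, n => n
  | fuel + 1, n => if n ∈ used then probeB_get_unused used fuel (n + 1) else n

def get_unused_extra_channel_id_py_alt (used_channel_ids : List Int) (start_from : Int) : Int :=
  probeB_get_unused (PySem.Set.ofList used_channel_ids) (used_channel_ids.length + 1) start_from

-- ===== PRECONDITION & SPEC =====
-- On inputs where start_from is itself a used id but some used id lies below start_from, A's guard
-- fires (sorted[0] != start_from) and A returns start_from even though it is used; B returns the first
-- id >= start_from that is actually unused, which is what 'lowest unused channel number' intends.
def D_get_unused_extra_channel_id_py (used_channel_ids : List Int) (start_from : Int) : Prop :=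
  start_from ∈ used_channel_ids ∧ ∃ x ∈ used_channel_ids, x < start_from
instance (used_channel_ids : List Int) (start_from : Int) : Decidable (D_get_unused_extra_channel_id_py used_channel_ids start_from) := by unfold D_get_unused_extra_channel_id_py; infer_instance

def Spec_get_unused_extra_channel_id_py (used_channel_ids : List Int) (start_from : Int) (out : Int) : Prop := ¬ D_get_unused_extra_channel_id_py used_channel_ids start_from → out = get_unused_extra_channel_id_py_alt used_channel_ids start_from
instance (used_channel_ids : List Int) (start_from : Int) (out : Int) : Decidable (Spec_get_unused_extra_channel_id_py used_channel_ids start_from out) := by unfold Spec_get_unused_extra_channel_id_py; infer_instance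

def pvDiffWitness_get_unused_extra_channel_id_py : List Int × Int := ([5, 10], 10)
def pvDiffWitnessOut_get_unused_extra_channel_id_py : Int × Int := (10, 11)

-- ===== CLAIM (what is proved, stated in full; the proofs are below) =====
def Claim_unchanged_get_unused_extra_channel_id_py : Prop := ∀ (used_channel_ids : List Int) (start_from : Int), Dom_get_unused_extra_channel_id_py used_channel_ids start_from → Spec_get_unused_extra_channel_id_py used_channel_ids start_from (get_unused_extra_channel_id_py used_channel_ids start_from)
def Claim_changed_get_unused_extra_channel_id_py : Prop := Dom_get_unused_extra_channel_id_py (pvDiffWitness_get_unused_extra_channel_id_py.1) (pvDiffWitness_get_unused_extra_channel_id_py.2) ∧ D_get_unused_extra_channel_id_py (pvDiffWitness_get_unused_extra_channel_id_py.1) (pvDiffWitness_get_unused_extra_channel_id_py.2) ∧ get_unused_extra_channel_id_py (pvDiffWitness_get_unused_extra_channel_id_py.1) (pvDiffWitness_get_unused_extra_channel_id_py.2) = pvDiffWitnessOut_get_unused_extra_channel_id_py.1 ∧ get_unused_extra_channel_id_py_alt (pvDiffWitness_get_unused_extra_channel_id_py.1) (pvDiffWitness_get_unused_extra_channel_id_py.2)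 = pvDiffWitnessOut_get_unused_extra_channel_id_py.2 ∧ pvDiffWitnessOut_get_unused_extra_channel_id_py.1 ≠ pvDiffWitnessOut_get_unused_extra_channel_id_py.2
def Claim_exact_get_unused_extra_channel_id_py : Prop := ∀ (used_channel_ids : List Int) (start_from : Int), Dom_get_unused_extra_channel_id_py used_channel_ids start_from → D_get_unused_extra_channel_id_py used_channel_ids start_from → get_unused_extra_channel_id_py used_channel_ids start_from ≠ get_unused_extra_channel_id_py_alt used_channel_ids start_from

-- ===== LEMMAS AND PROOFS =====

-- B's probe never goes below its starting point.
theorem probeB_ge (used : List Int) (f : Nat) (n : Int) : n ≤ probeB_get_unused used f n := by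
  induction f generalizing n with
  | zero => simp [probeB_get_unused]
  | succ f ih =>
    simp only [probeB_get_unused]
    split
    · exact le_trans (by omega) (ih (n + 1))
    · exact le_refl n

-- The core bridge: on a strictly increasing list u whose elements are ≥ i and whose membership agrees
-- (at or above i) with the probe set w, A's enumerate-scan equals B's probe, given enough fuel.
theorem scan_eq_probe (u : List Int) (hu : u.Pairwise (· < ·)) :
    ∀ (w : List Int) (i : Int), (∀ v ∈ u, i ≤ v) →
      (∀ n, i ≤ n → (n ∈ w ↔ n ∈ u)) →
      ∀ f : Nat, u.length < f → scanA_get_unused u i = probeB_get_unused w f i := by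
  induction u with
  | nil =>
    intro w i _ hmem f hf
    obtain ⟨f', rfl⟩ : ∃ f', f = f' + 1 := ⟨f - 1, by omega⟩
    have : i ∉ w := fun h => (List.not_mem_nil) ((hmem i le_rfl).mp h)
    simp [scanA_get_unused, probeB_get_unused, this]
  | cons v rest ih =>
    intro w i hle hmem f hf
    obtain ⟨f', rfl⟩ : ∃ f', f = f' + 1 := ⟨f - 1, by omega⟩
    have hpw := (List.pairwise_cons.mp hu)
    by_cases hiv : i = v
    · subst hiv
      have hiw : i ∈ w := (hmem i le_rfl).mpr (List.mem_cons_self)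
      simp only [scanA_get_unused, probeB_get_unused, if_pos hiw, ne_eq, not_true_eq_false,
        if_false]
      exact ih hpw.2 w (i + 1)
        (fun x hx => by have := hpw.1 x hx; omega)
        (fun n hn => by
          rw [hmem n (by omega), List.mem_cons]
          constructor
          · rintro (rfl | h)
            · omega
            · exact h
          · exact Or.inr)
        f' (by simpa using Nat.lt_of_succ_lt_succ hf)
    · have hiu : i ∉ v :: rest := by
        intro h
        rcases List.mem_cons.mp h with rfl | h
        · exact hiv rfl
        · have := hpw.1 i h
          have := hle v List.mem_cons_self
          omega
      have hiw : i ∉ w := fun h => hiu ((hmem i le_rfl).mp h)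
      simp [scanA_get_unused, probeB_get_unused, hiv, hiw]

-- The body of port A, with the sorted deduplicated list abstracted, equals port B outside D_.
theorem body_eq_probe (ids : List Int) (s : Int) (u : List Int)
    (husrt : u = PySem.List.sorted (PySem.Set.ofList ids) (fun x => x) false)
    (hD : ¬ D_get_unused_extra_channel_id_py ids s) :
    (if u.length = 0 ∨ PySem.List.pyGet? u 0 ≠ some s then s else scanA_get_unused u s)
      = probeB_get_unused (PySem.Set.ofList ids) (ids.length + 1) s := by
  have hmemu : ∀ n : Int, n ∈ u ↔ n ∈ ids := by
    intro n
    rw [husrt, PySem.List.mem_sorted]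
    exact PySem.List.mem_dedup ids n
  have hpw : u.Pairwise (· < ·) := by
    rw [husrt]; exact PySem.List.sorted_ofList_pairwise_lt ids
  by_cases hg : u.length = 0 ∨ PySem.List.pyGet? u 0 ≠ some s
  · -- A returns start_from; show start_from ∉ used, so the probe also stops at once
    rw [if_pos hg]
    have hs : s ∉ ids := by
      intro hsids
      have hnolow : ∀ x ∈ ids, ¬ x < s := fun x hx hxlt => hD ⟨hsids, x, hx, hxlt⟩
      obtain ⟨h, t, rfl⟩ : ∃ h t, u = h :: t := by
        rcases u with _ | ⟨h, t⟩
        · exact absurd ((hmemu s).mpr hsids) (List.not_mem_nil)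
        · exact ⟨h, t, rfl⟩
      have hh : h = s := by
        have hhs : ¬ h < s := hnolow h ((hmemu h).mp List.mem_cons_self)
        rcases List.mem_cons.mp ((hmemu s).mpr hsids) with rfl | hst
        · rfl
        · have := (List.pairwise_cons.mp hpw).1 s hst
          omega
      rcases hg with hg | hg
      · simp at hg
      · subst hh
        simp at hg
    have hsw : s ∉ PySem.Set.ofList ids := fun h => hs ((PySem.List.mem_dedup ids s).mp h)
    simp [probeB_get_unused, hsw]
  · rw [if_neg hg]
    rw [not_or, not_not] at hg
    obtain ⟨h, t, rfl⟩ : ∃ h t, u = h :: t := by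
      rcases u with _ | ⟨h, t⟩
      · simp at hg
      · exact ⟨h, t, rfl⟩
    have hh : h = s := by
      have := hg.2
      simpa using this
    subst hh
    have hlen : (h :: t).length ≤ ids.length := by
      rw [husrt, PySem.List.length_sorted]
      exact PySem.Set.length_ofList_le ids
    exact scan_eq_probe _ hpw (PySem.Set.ofList ids) h
      (fun v hv => by
        rcases List.mem_cons.mp hv with rfl | hv
        · exact le_refl v
        · exact le_of_lt ((List.pairwise_cons.mp hpw).1 v hv))
      (fun n _ => (PySem.List.mem_dedup ids n).trans (hmemu n).symm)
      (ids.length + 1) (by omega)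

-- ===== VERDICT (by name: the statement is the Claim_ definition above) =====
theorem get_unused_extra_channel_id_py_spec : Claim_unchanged_get_unused_extra_channel_id_py := by
  unfold Claim_unchanged_get_unused_extra_channel_id_py
  intro ids s _ hD
  unfold get_unused_extra_channel_id_py get_unused_extra_channel_id_py_alt
  exact body_eq_probe ids s _ rfl hD

theorem get_unused_extra_channel_id_py_changed : Claim_changed_get_unused_extra_channel_id_py := by
  unfold Claim_changed_get_unused_extra_channel_id_py; decide

theorem get_unused_extra_channel_id_py_tight : Claim_exact_get_unused_extra_channel_id_py := by
  unfold Claim_exact_get_unused_extra_channel_id_py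
  intro ids s _ hD
  obtain ⟨hsids, x, hx, hxlt⟩ := hD
  -- A returns start_from: the sorted head is ≤ x < start_from, so the guard fires
  have hA : get_unused_extra_channel_id_py ids s = s := by
    unfold get_unused_extra_channel_id_py
    have hmemu : ∀ n : Int,
        n ∈ PySem.List.sorted (PySem.Set.ofList ids) (fun x => x) false ↔ n ∈ ids := by
      intro n
      rw [PySem.List.mem_sorted]
      exact PySem.List.mem_dedup ids n
    have hpw := PySem.List.sorted_ofList_pairwise_lt ids
    obtain ⟨h, t, hcons⟩ : ∃ h t,
        PySem.List.sorted (PySem.Set.ofList ids) (fun x => x) false = h :: t := by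
      rcases hc : PySem.List.sorted (PySem.Set.ofList ids) (fun x => x) false with _ | ⟨h, t⟩
      · rw [hc] at hmemu
        exact absurd ((hmemu x).mpr hx) (List.not_mem_nil)
      · exact ⟨h, t, rfl⟩
    rw [hcons] at hmemu hpw ⊢
    have hhx : h ≤ x := by
      rcases List.mem_cons.mp ((hmemu x).mpr hx) with rfl | hxt
      · exact le_rfl
      · exact le_of_lt ((List.pairwise_cons.mp hpw).1 x hxt)
    rw [if_pos]
    right
    intro hc
    simp at hc
    omega
  -- B returns at least start_from + 1, since start_from is in the probe set
  have hB : s + 1 ≤ get_unused_extra_channel_id_py_alt ids s := by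
    unfold get_unused_extra_channel_id_py_alt
    have hsw : s ∈ PySem.Set.ofList ids := (PySem.List.mem_dedup ids s).mpr hsids
    simp only [probeB_get_unused, if_pos hsw]
    exact probeB_ge _ ids.length (s + 1)
  omega
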